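-- pv_equiv track=rewrite | github.com/roloffs/gmailsort | gmail/gmail.py | __is_sublabel
-- ===== SOURCE A (Python) =====
-- def __is_sublabel(label_name, sublabel_name):
--     label_tokens = list(filter(None, label_name.lower().split("/")))
--     sublabel_tokens = list(filter(None, sublabel_name.lower().split("/")))
--     if len(sublabel_tokens) < len(label_tokens):
--         return False
--     for i in range(len(label_tokens)):
--         if label_tokens[i] != sublabel_tokens[i]:
--             return False
--     return True
-- ===== SOURCE B (Python) =====
-- def __is_sublabel(label_name, sublabel_name):
--     l = "/".join(filter(None, label_name.lower().split("/")))
--     s = "/".join(filter(None, sublabel_name.lower().split("/")))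
--     if l == "":
--         return True
--     return s == l or s.startswith(l + "/")
-- ===== Notes on version B (the rewrite author's own statement) =====
-- stated objective: idiomatic
-- what changed: B normalizes each name to one '/'-joined lowercase string and decides with string equality / startswith on the label plus a '/' boundary, instead of A's length check and token-by-token index loop over two token lists.
import Mathlib
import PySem

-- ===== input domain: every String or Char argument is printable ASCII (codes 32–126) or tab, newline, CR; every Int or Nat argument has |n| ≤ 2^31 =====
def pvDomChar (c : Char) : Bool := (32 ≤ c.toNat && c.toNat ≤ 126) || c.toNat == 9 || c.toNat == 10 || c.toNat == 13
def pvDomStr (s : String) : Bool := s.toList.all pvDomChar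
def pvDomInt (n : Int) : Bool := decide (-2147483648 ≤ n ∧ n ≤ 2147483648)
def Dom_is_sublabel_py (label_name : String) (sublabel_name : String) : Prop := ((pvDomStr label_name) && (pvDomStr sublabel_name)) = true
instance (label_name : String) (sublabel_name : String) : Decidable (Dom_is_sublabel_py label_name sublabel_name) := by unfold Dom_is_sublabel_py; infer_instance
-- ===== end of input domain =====

-- B replaces A's token-by-token index loop by normalizing each name to one '/'-joined
-- lowercase string and using string equality / startswith with a '/' boundary (objective: idiomatic).

-- ===== PORT A =====
-- the 'for i in range(len(label_tokens)): if label_tokens[i] != sublabel_tokens[i]: return False' loop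
def aCheck (lt st : List String) : List Int → Bool
  | [] => true
  | i :: rest =>
      if PySem.List.pyGetD lt i "" ≠ PySem.List.pyGetD st i "" then false
      else aCheck lt st rest

def is_sublabel_py (label_name : String) (sublabel_name : String) : Bool :=
  let label_tokens := ((PySem.Str.split? (PySem.Str.lower label_name) "/").getD []).filter (fun t => decide (t ≠ ""))
  let sublabel_tokens := ((PySem.Str.split? (PySem.Str.lower sublabel_name) "/").getD []).filter (fun t => decide (t ≠ ""))
  if sublabel_tokens.length < label_tokens.length then false
  else aCheck label_tokens sublabel_tokens (PySem.List.pyRange 0 label_tokens.length 1)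

-- ===== PORT B =====
def is_sublabel_py_alt (label_name : String) (sublabel_name : String) : Bool :=
  let l := PySem.Str.join "/" (((PySem.Str.split? (PySem.Str.lower label_name) "/").getD []).filter (fun t => decide (t ≠ "")))
  let s := PySem.Str.join "/" (((PySem.Str.split? (PySem.Str.lower sublabel_name) "/").getD []).filter (fun t => decide (t ≠ "")))
  if l == "" then true
  else s == l || PySem.Str.startswith s (l ++ "/")

-- ===== PRECONDITION & SPEC =====
def Spec_is_sublabel_py (label_name : String) (sublabel_name : String) (out : Bool) : Prop := out = is_sublabel_py_alt label_name sublabel_name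
instance (label_name : String) (sublabel_name : String) (out : Bool) : Decidable (Spec_is_sublabel_py label_name sublabel_name out) := by unfold Spec_is_sublabel_py; infer_instance

-- ===== CLAIM (what is proved, stated in full; the proofs are below) =====
def Claim_equal_is_sublabel_py : Prop := ∀ (label_name : String) (sublabel_name : String), Dom_is_sublabel_py label_name sublabel_name → Spec_is_sublabel_py label_name sublabel_name (is_sublabel_py label_name sublabel_name)

-- ===== LEMMAS AND PROOFS =====

-- the token list both ports compute (proof-side abbreviation)
def pvTokens (x : String) : List String :=
  ((PySem.Str.split? (PySem.Str.lower x) "/").getD []).filter (fun t => decide (t ≠ ""))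

-- every chunk produced by splitOn on separator "/" is slash-free
theorem pvGoSepFree (fuel : Nat) (l cur : List Char) (acc : List (List Char))
    (hf : l.length ≤ fuel) (hcur : '/' ∉ cur) (hacc : ∀ a ∈ acc, '/' ∉ a) :
    ∀ t ∈ PySem.Chars.splitOn.go ['/'] fuel l cur acc, '/' ∉ t := by
  induction fuel generalizing l cur acc with
  | zero =>
      have hl : l = [] := by
        cases l with
        | nil => rfl
        | cons c r => simp at hf
      subst hl
      intro t ht
      simp [PySem.Chars.splitOn.go] at ht
      rcases ht with h | h
      · exact hacc t h
      · subst h; simpa using hcur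
  | succ n ih =>
      intro t ht
      cases l with
      | nil =>
          simp [PySem.Chars.splitOn.go] at ht
          rcases ht with h | h
          · exact hacc t h
          · subst h; simpa using hcur
      | cons c r =>
          rw [PySem.Chars.splitOn.go] at ht
          by_cases hpre : List.isPrefixOf ['/'] (c :: r) = true
          · rw [if_pos hpre] at ht
            refine ih (List.drop 1 (c :: r)) [] (cur.reverse :: acc) ?_ (by simp) ?_ t ht
            · simp at hf ⊢; omega
            · intro a ha
              rcases List.mem_cons.mp ha with h | h
              · subst h; simpa using hcur
              · exact hacc a h
          · rw [if_neg hpre] at ht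
            have hc : c ≠ '/' := by
              intro h; subst h
              simp [List.isPrefixOf] at hpre
            refine ih r (c :: cur) acc ?_ ?_ hacc t ht
            · simp at hf ⊢; omega
            · intro h
              rcases List.mem_cons.mp h with h | h
              · exact hc h.symm
              · exact hcur h

theorem pvSplitSepFree (cs : List Char) :
    ∀ t ∈ PySem.Chars.splitOn cs ['/'], '/' ∉ t := by
  unfold PySem.Chars.splitOn
  exact pvGoSepFree (cs.length + 1) cs [] [] (by omega) (by simp) (by simp)

-- every token's char list: each token is followed by an explicit '/' marker
def pvJ (ts : List (List Char)) : List Char := (ts.map (fun t => t ++ ['/'])).flatten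

theorem pvJ_cons (t : List Char) (ts : List (List Char)) :
    pvJ (t :: ts) = t ++ '/' :: pvJ ts := by
  simp [pvJ]

-- first-'/'-boundary lemma: with slash-free t and s, a prefix relation between
-- t ++ '/' :: u and s ++ '/' :: v forces t = s
theorem pvCore (t : List Char) (u : List Char) :
    ∀ (s v : List Char), '/' ∉ t → '/' ∉ s →
      ((t ++ '/' :: u <+: s ++ '/' :: v) ↔ (t = s ∧ u <+: v)) := by
  induction t with
  | nil =>
      intro s v _ hs
      cases s with
      | nil => simp [List.cons_prefix_cons]
      | cons d s' =>
          simp only [List.nil_append, List.cons_append, List.cons_prefix_cons]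
          constructor
          · rintro ⟨h, -⟩
            exact absurd h.symm (by intro hh; exact hs (by simp [hh]))
          · rintro ⟨h, -⟩; exact absurd h (by simp)
  | cons c t' ih =>
      intro s v ht hs
      cases s with
      | nil =>
          simp only [List.cons_append, List.nil_append, List.cons_prefix_cons]
          constructor
          · rintro ⟨h, -⟩
            exact absurd h (by intro hh; exact ht (by simp [hh]))
          · rintro ⟨h, -⟩; exact absurd h (by simp)
      | cons d s' =>
          simp only [List.cons_append, List.cons_prefix_cons]
          have ht' : '/' ∉ t' := fun h => ht (List.mem_cons_of_mem _ h)
          have hs' : '/' ∉ s' := fun h => hs (List.mem_cons_of_mem _ h)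
          rw [ih s' v ht' hs']
          constructor
          · rintro ⟨h1, h2, h3⟩; exact ⟨by rw [h1, h2], h3⟩
          · rintro ⟨h1, h2⟩
            injection h1 with hcd hts
            exact ⟨hcd, hts, h2⟩

-- marker-joined prefix ↔ token-list prefix, for slash-free tokens
theorem pvJPrefix (ts : List (List Char)) :
    ∀ (ss : List (List Char)), (∀ t ∈ ts, '/' ∉ t) → (∀ t ∈ ss, '/' ∉ t) →
      ((pvJ ts <+: pvJ ss) ↔ ts <+: ss) := by
  induction ts with
  | nil => intro ss _ _; simp [pvJ]
  | cons t ts' ih =>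
      intro ss hts hss
      cases ss with
      | nil =>
          rw [show pvJ ([] : List (List Char)) = [] from rfl, pvJ_cons]
          simp [List.prefix_nil]
      | cons s ss' =>
          rw [pvJ_cons, pvJ_cons,
            pvCore t (pvJ ts') s (pvJ ss') (hts t (by simp)) (hss s (by simp)),
            List.cons_prefix_cons,
            ih ss' (fun x hx => hts x (List.mem_cons_of_mem _ hx))
              (fun x hx => hss x (List.mem_cons_of_mem _ hx))]

-- pvJ is the '/'-join plus a trailing '/'
theorem pvJ_eq_join (ts : List (List Char)) (h : ts ≠ []) :
    pvJ ts = PySem.Chars.join ['/'] ts ++ ['/'] := by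
  induction ts with
  | nil => exact absurd rfl h
  | cons t ts' ih =>
      cases ts' with
      | nil => simp [pvJ, PySem.Chars.join_singleton]
      | cons u rest =>
          rw [pvJ_cons, ih (by simp), PySem.Chars.join_cons_cons]
          simp

theorem pvJoin_ne_nil (t : List Char) (ts : List (List Char)) (ht : t ≠ []) :
    PySem.Chars.join ['/'] (t :: ts) ≠ [] := by
  cases ts with
  | nil => simpa [PySem.Chars.join_singleton] using ht
  | cons u rest =>
      rw [PySem.Chars.join_cons_cons]
      simp

-- A's loop over range(k, len lt) decides prefix-hood of the dropped suffixes
theorem pvACheckDrop (lt st : List String) (hlen : lt.length ≤ st.length) :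
    ∀ (n k : Nat), lt.length - k = n → k ≤ lt.length →
      aCheck lt st (PySem.List.pyRange (k : Int) (lt.length : Int) 1)
        = (lt.drop k).isPrefixOf (st.drop k) := by
  intro n
  induction n with
  | zero =>
      intro k hn hk
      have hkl : k = lt.length := by omega
      subst hkl
      rw [PySem.List.pyRange_one_eq_nil (le_refl _)]
      simp [aCheck, List.drop_length]
  | succ m ih =>
      intro k hn hk
      have hk1 : k < lt.length := by omega
      have hk2 : k < st.length := by omega
      rw [PySem.List.pyRange_one_cons (by exact_mod_cast hk1)]
      have hcast : ((k : Int) + 1) = ((k + 1 : Nat) : Int) := by push_cast; ring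
      rw [show aCheck lt st ((k : Int) :: PySem.List.pyRange ((k : Int) + 1) (lt.length : Int) 1)
            = if PySem.List.pyGetD lt (k : Int) "" ≠ PySem.List.pyGetD st (k : Int) "" then false
              else aCheck lt st (PySem.List.pyRange ((k : Int) + 1) (lt.length : Int) 1) from rfl]
      rw [hcast, ih (k + 1) (by omega) (by omega)]
      rw [PySem.List.pyGetD_natCast, PySem.List.pyGetD_natCast]
      rw [← List.getElem_cons_drop hk1, ← List.getElem_cons_drop hk2]
      have hg1 : lt.getD k "" = lt[k] := List.getD_eq_getElem lt "" hk1
      have hg2 : st.getD k "" = st[k] := List.getD_eq_getElem st "" hk2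
      rw [hg1, hg2]
      by_cases h : lt[k] = st[k]
      · simp [h, List.isPrefixOf]
      · simp [h, List.isPrefixOf]

-- A computes token-list prefix-hood
theorem pvA_eq (label_name sublabel_name : String) :
    is_sublabel_py label_name sublabel_name
      = (pvTokens label_name).isPrefixOf (pvTokens sublabel_name) := by
  show (if (pvTokens sublabel_name).length < (pvTokens label_name).length then false
        else aCheck (pvTokens label_name) (pvTokens sublabel_name)
          (PySem.List.pyRange 0 ((pvTokens label_name).length : Int) 1))
      = (pvTokens label_name).isPrefixOf (pvTokens sublabel_name)
  set lt := pvTokens label_name with hlt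
  set st := pvTokens sublabel_name with hst
  by_cases hlen : st.length < lt.length
  · rw [if_pos hlen]
    have : ¬ lt <+: st := fun h => absurd h.length_le (by omega)
    symm
    rw [Bool.eq_false_iff]
    intro hc
    exact this (List.isPrefixOf_iff_prefix.mp hc)
  · rw [if_neg hlen]
    have := pvACheckDrop lt st (by omega) lt.length 0 (by omega) (by omega)
    simpa using this

-- the char lists of both ports' tokens: slash-free and nonempty
theorem pvTokens_toList (x : String) :
    (pvTokens x).map String.toList
      = (PySem.Chars.splitOn (PySem.Chars.lower x.toList) ['/']).filter (fun t => decide (t ≠ [])) := by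
  unfold pvTokens
  rw [show PySem.Str.split? (PySem.Str.lower x) "/"
        = some ((PySem.Chars.splitOn (PySem.Chars.lower x.toList) ['/']).map String.ofList) from by
    simp [PySem.Str.split?, PySem.Chars.split?, PySem.Str.lower]]
  rw [Option.getD_some, List.filter_map, List.map_map]
  rw [show (String.toList ∘ String.ofList) = id from funext (fun l => by simp)]
  rw [List.map_id]
  apply List.filter_congr
  intro t _
  simp only [Function.comp_apply, decide_eq_decide]
  constructor
  · intro h hh
    exact h (by rw [hh])
  · intro h hh
    apply h
    have := congrArg String.toList hh
    simpa using this

theorem pvTokens_sepFree (x : String) :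
    ∀ t ∈ (pvTokens x).map String.toList, '/' ∉ t := by
  rw [pvTokens_toList]
  intro t ht
  exact pvSplitSepFree (PySem.Chars.lower x.toList) t (List.mem_of_mem_filter ht)

theorem pvTokens_ne_nil (x : String) :
    ∀ t ∈ (pvTokens x).map String.toList, t ≠ [] := by
  rw [pvTokens_toList]
  intro t ht
  have := List.of_mem_filter ht
  simpa using this

-- B computes token-list prefix-hood too
theorem pvB_eq (label_name sublabel_name : String) :
    is_sublabel_py_alt label_name sublabel_name
      = (pvTokens label_name).isPrefixOf (pvTokens sublabel_name) := by
  show (if PySem.Str.join "/" (pvTokens label_name) == "" then true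
        else (PySem.Str.join "/" (pvTokens sublabel_name) == PySem.Str.join "/" (pvTokens label_name)
          || PySem.Str.startswith (PySem.Str.join "/" (pvTokens sublabel_name))
              (PySem.Str.join "/" (pvTokens label_name) ++ "/")))
      = (pvTokens label_name).isPrefixOf (pvTokens sublabel_name)
  set lt := pvTokens label_name with hltdef
  set st := pvTokens sublabel_name with hstdef
  set ltC := lt.map String.toList with hltC
  set stC := st.map String.toList with hstC
  have hltFree : ∀ t ∈ ltC, '/' ∉ t := pvTokens_sepFree label_name
  have hstFree : ∀ t ∈ stC, '/' ∉ t := pvTokens_sepFree sublabel_name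
  have hltNe : ∀ t ∈ ltC, t ≠ [] := pvTokens_ne_nil label_name
  have hstNe : ∀ t ∈ stC, t ≠ [] := pvTokens_ne_nil sublabel_name
  have hjoinL : (PySem.Str.join "/" lt).toList = PySem.Chars.join ['/'] ltC := by
    rw [PySem.Str.toList_join]; rfl
  have hjoinS : (PySem.Str.join "/" st).toList = PySem.Chars.join ['/'] stC := by
    rw [PySem.Str.toList_join]; rfl
  have hprefix : (lt <+: st) ↔ (ltC <+: stC) :=
    (List.prefix_map_iff_of_injective (fun a b h => String.ext_iff.mpr h)).symm
  cases hcase : ltC with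
  | nil =>
      rw [hltC] at hcase
      have hlt0 : lt = [] := List.map_eq_nil_iff.mp hcase
      have hcond : (PySem.Str.join "/" lt == "") = true := by
        rw [hlt0]
        decide
      rw [if_pos hcond, hlt0]
      simp [List.isPrefixOf]
  | cons t ts =>
      have hlt0 : lt ≠ [] := by
        intro h; rw [hltC, h] at hcase; simp at hcase
      have htne : t ≠ [] := hltNe t (by rw [hcase]; simp)
      have hJne : PySem.Chars.join ['/'] ltC ≠ [] := by
        rw [hcase]; exact pvJoin_ne_nil t ts htne
      have hcond : (PySem.Str.join "/" lt == "") = false := by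
        rw [Bool.beq_eq_decide_eq, decide_eq_false_iff_not]
        intro h
        apply hJne
        rw [← hjoinL, h]
        rfl
      rw [if_neg (by simp [hcond])]
      -- reduce the two string tests to char-list statements
      have hEq : (PySem.Str.join "/" st == PySem.Str.join "/" lt)
          = decide (PySem.Chars.join ['/'] stC = PySem.Chars.join ['/'] ltC) := by
        rw [Bool.beq_eq_decide_eq, decide_eq_decide]
        rw [String.ext_iff, hjoinL, hjoinS]
      have hSw : PySem.Str.startswith (PySem.Str.join "/" st) (PySem.Str.join "/" lt ++ "/")
          = decide ((PySem.Chars.join ['/'] ltC ++ ['/']) <+: PySem.Chars.join ['/'] stC) := by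
        rw [PySem.Str.startswith_eq]
        rw [show (PySem.Str.join "/" lt ++ "/").toList
              = PySem.Chars.join ['/'] ltC ++ ['/'] by simp [hjoinL]]
        rw [hjoinS]
        rw [PySem.Chars.startswith]
        rw [Bool.eq_iff_iff]
        simp [List.isPrefixOf_iff_prefix]
      rw [hEq, hSw]
      -- combine: equality-or-boundary-prefix ↔ marker-joined prefix ↔ token prefix
      have key : ((PySem.Chars.join ['/'] stC = PySem.Chars.join ['/'] ltC)
            ∨ ((PySem.Chars.join ['/'] ltC ++ ['/']) <+: PySem.Chars.join ['/'] stC))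
          ↔ (ltC <+: stC) := by
        rw [← pvJPrefix ltC stC hltFree hstFree]
        rw [pvJ_eq_join ltC (by rw [hcase]; simp)]
        cases hscase : stC with
        | nil =>
            constructor
            · rintro (h | h)
              · rw [PySem.Chars.join_nil] at h
                exact absurd h.symm hJne
              · rw [PySem.Chars.join_nil] at h
                exact absurd (List.prefix_nil.mp h) (by simp)
            · intro h
              simp [pvJ, List.prefix_nil] at h
        | cons s ss =>
            rw [← hscase, pvJ_eq_join stC (by rw [hscase]; simp)]
            rw [List.prefix_concat_iff, List.append_left_inj]
            constructor
            · rintro (h | h)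
              · left; exact h.symm
              · right; exact h
            · rintro (h | h)
              · left; exact h.symm
              · right; exact h
      rw [Bool.eq_iff_iff]
      simp only [Bool.or_eq_true, decide_eq_true_eq, List.isPrefixOf_iff_prefix]
      rw [hprefix, ← key]

-- ===== VERDICT (by name: the statement is the Claim_ definition above) =====
theorem is_sublabel_py_spec : Claim_equal_is_sublabel_py := by
  intro label_name sublabel_name _
  unfold Spec_is_sublabel_py
  rw [pvA_eq, pvB_eq]
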